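-- pv_equiv track=rewrite | github.com/hannesbachmann/aoc_2023 | december_05.py | separate_by_empty_lines
-- ===== SOURCE A (Python) =====
-- def separate_by_empty_lines(input_lines: list[str]) -> list[list[str]]:
--     frames = [[]]
--     frame_idx = 0
--     for line in input_lines:
--         if not line == '':
--             frames[frame_idx].append(line)
--         else:
--             frames.append([])
--             frame_idx += 1
--     return frames
-- ===== SOURCE B (Python) =====
-- def separate_by_empty_lines(input_lines: list[str]) -> list[list[str]]:
--     cuts = [-1] + [i for i, line in enumerate(input_lines) if line == ''] + [len(input_lines)]
--     return [input_lines[a + 1:b] for a, b in zip(cuts, cuts[1:])]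
-- ===== Notes on version B (the rewrite author's own statement) =====
-- stated objective: alternative
-- what changed: A builds the frames in one pass by appending each line to a mutable current frame; B instead first collects the indices of the empty lines as cut points (-1 and len appended) and then emits the frames as slices between consecutive cut points.
import Mathlib
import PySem

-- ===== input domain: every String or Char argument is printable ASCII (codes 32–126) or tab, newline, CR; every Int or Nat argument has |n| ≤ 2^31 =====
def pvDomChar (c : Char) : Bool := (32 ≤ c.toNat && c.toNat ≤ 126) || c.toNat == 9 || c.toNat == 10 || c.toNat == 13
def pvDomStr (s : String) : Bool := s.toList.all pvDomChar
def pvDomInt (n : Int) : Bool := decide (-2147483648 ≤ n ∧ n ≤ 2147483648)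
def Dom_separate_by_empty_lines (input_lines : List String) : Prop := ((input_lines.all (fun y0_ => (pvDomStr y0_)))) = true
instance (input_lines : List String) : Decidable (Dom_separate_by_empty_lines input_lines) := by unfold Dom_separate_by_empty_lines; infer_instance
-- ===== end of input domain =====

-- B replaces A's one-pass mutable-accumulator loop by a two-pass scheme: collect the
-- indices of empty lines as cut points and emit the slices between consecutive cut points.

-- ===== PORT A =====
def separate_by_empty_lines (input_lines : List String) : List (List String) :=
  (input_lines.foldl
    (fun (st : List (List String) × Nat) line =>
      if ¬ (line = "") then (st.1.modify st.2 (fun f => f ++ [line]), st.2)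
      else (st.1 ++ [[]], st.2 + 1))
    ([[]], 0)).1

-- ===== PORT B =====
def separate_by_empty_lines_alt (input_lines : List String) : List (List String) :=
  let cuts : List Int :=
    -1 :: (((PySem.List.enumerate input_lines).filter (fun p => p.2 = "")).map (·.1)
           ++ [(input_lines.length : Int)])
  (cuts.zip cuts.tail).map (fun ab =>
    PySem.List.slice input_lines (some (ab.1 + 1)) (some ab.2))

-- ===== PRECONDITION & SPEC =====
def Spec_separate_by_empty_lines (input_lines : List String) (out : List (List String)) : Prop := out = separate_by_empty_lines_alt input_lines
instance (input_lines : List String) (out : List (List String)) : Decidable (Spec_separate_by_empty_lines input_lines out) := by unfold Spec_separate_by_empty_lines; infer_instance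

-- ===== CLAIM (what is proved, stated in full; the proofs are below) =====
def Claim_equal_separate_by_empty_lines : Prop := ∀ (input_lines : List String), Dom_separate_by_empty_lines input_lines → Spec_separate_by_empty_lines input_lines (separate_by_empty_lines input_lines)

-- ===== LEMMAS AND PROOFS =====

-- Reference recursive splitter both ports are reduced to.
def splitRec : List String → List (List String)
  | [] => [[]]
  | x :: r =>
    if x = "" then [] :: splitRec r
    else
      match splitRec r with
      | [] => [[x]]
      | g :: gs => (x :: g) :: gs

theorem splitRec_ne_nil (xs : List String) : splitRec xs ≠ [] := by
  cases xs with
  | nil => simp [splitRec]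
  | cons x r =>
    simp only [splitRec]
    split
    · simp
    · cases h : splitRec r <;> simp

theorem modify_last {α : Type} (fs : List α) (c : α) (f : α → α) :
    (fs ++ [c]).modify fs.length f = fs ++ [f c] := by
  induction fs with
  | nil => simp
  | cons a t ih => simpa using ih

-- A's fold, generalized over an accumulator fs ++ [c] with index fs.length.
theorem foldA_eq (xs : List String) (fs : List (List String)) (c : List String) :
    (xs.foldl
      (fun (st : List (List String) × Nat) line =>
        if ¬ (line = "") then (st.1.modify st.2 (fun f => f ++ [line]), st.2)
        else (st.1 ++ [[]], st.2 + 1))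
      (fs ++ [c], fs.length)).1
    = fs ++ (match splitRec xs with
             | [] => []
             | g :: gs => (c ++ g) :: gs) := by
  induction xs generalizing fs c with
  | nil => simp [splitRec]
  | cons x r ih =>
    by_cases hx : x = ""
    · subst hx
      simp only [List.foldl_cons]
      rw [if_neg (by simp), show fs.length + 1 = (fs ++ [c]).length by simp,
        ih (fs ++ [c]) []]
      simp only [splitRec]
      cases h : splitRec r with
      | nil => exact absurd h (splitRec_ne_nil r)
      | cons g gs => simp
    · simp only [List.foldl_cons, if_pos (by simpa using hx)]
      rw [modify_last, ih fs (c ++ [x])]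
      simp only [splitRec, if_neg hx]
      cases h : splitRec r with
      | nil => exact absurd h (splitRec_ne_nil r)
      | cons g gs => simp

theorem portA_eq_splitRec (xs : List String) :
    separate_by_empty_lines xs = splitRec xs := by
  have := foldA_eq xs [] []
  simp only [List.nil_append, List.length_nil] at this
  unfold separate_by_empty_lines
  rw [this]
  cases h : splitRec xs with
  | nil => exact absurd h (splitRec_ne_nil xs)
  | cons g gs => simp

-- empty-line indices of xs, as port B computes them
def sepIdx (xs : List String) : List Int :=
  ((PySem.List.enumerate xs).filter (fun p => p.2 = "")).map (·.1)

-- the slices between consecutive cut points, as port B computes them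
def sliceMap (xs : List String) (cuts : List Int) : List (List String) :=
  (cuts.zip cuts.tail).map (fun ab =>
    PySem.List.slice xs (some (ab.1 + 1)) (some ab.2))

theorem enum_shift (xs : List String) (s : Int) :
    PySem.List.enumerate xs (s + 1)
      = (PySem.List.enumerate xs s).map (fun p => (p.1 + 1, p.2)) := by
  induction xs generalizing s with
  | nil => simp [PySem.List.enumerate_nil]
  | cons x r ih =>
    rw [PySem.List.enumerate_cons, PySem.List.enumerate_cons, ih (s + 1)]
    simp

theorem sepIdx_cons (x : String) (r : List String) :
    sepIdx (x :: r)
      = (if x = "" then [(0 : Int)] else []) ++ (sepIdx r).map (· + 1) := by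
  unfold sepIdx
  rw [PySem.List.enumerate_cons, show (0 : Int) + 1 = 0 + 1 by ring, enum_shift]
  by_cases hx : x = "" <;>
    simp [hx, List.filter_map, List.map_map, Function.comp_def]

theorem sepIdx_nonneg (xs : List String) : ∀ a ∈ sepIdx xs, 0 ≤ a := by
  induction xs with
  | nil => simp [sepIdx, PySem.List.enumerate_nil]
  | cons x r ih =>
    intro a ha
    rw [sepIdx_cons] at ha
    rcases List.mem_append.1 ha with h | h
    · by_cases hx : x = ""
      · rw [if_pos hx] at h; simp at h; omega
      · rw [if_neg hx] at h; simp at h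
    · obtain ⟨b, hb, rfl⟩ := List.mem_map.1 h
      have := ih b hb; omega

theorem slice_zero_zero (xs : List String) :
    PySem.List.slice xs (some 0) (some 0) = [] := by
  rw [PySem.List.slice_toNat _ le_rfl le_rfl]; simp

theorem slice_cons_zero (x : String) (r : List String) (b : Int) (hb : 0 ≤ b) :
    PySem.List.slice (x :: r) (some 0) (some (b + 1))
      = x :: PySem.List.slice r (some 0) (some b) := by
  rw [PySem.List.slice_toNat _ le_rfl (by omega),
      PySem.List.slice_toNat _ le_rfl hb]
  have h1 : (b + 1).toNat = b.toNat + 1 := by omega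
  simp [h1]

theorem slice_cons_shift (x : String) (r : List String) (a b : Int)
    (ha : 0 ≤ a) (hb : 0 ≤ b) :
    PySem.List.slice (x :: r) (some (a + 1)) (some (b + 1))
      = PySem.List.slice r (some a) (some b) := by
  rw [PySem.List.slice_toNat _ (by omega) (by omega),
      PySem.List.slice_toNat _ ha hb]
  have h1 : (a + 1).toNat = a.toNat + 1 := by omega
  have h2 : (b + 1).toNat - (a + 1).toNat = b.toNat - a.toNat := by omega
  rw [h2, h1]
  simp

theorem shift_tail (x : String) (r : List String) :
    ∀ (t0 : Int) (t' : List Int), 0 ≤ t0 → (∀ a ∈ t', 0 ≤ a) →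
    ((((t0 + 1) :: t'.map (· + 1)).zip (t'.map (· + 1))).map (fun ab =>
        PySem.List.slice (x :: r) (some (ab.1 + 1)) (some ab.2)))
      = ((t0 :: t').zip t').map (fun ab =>
          PySem.List.slice r (some (ab.1 + 1)) (some ab.2)) := by
  intro t0 t' h0 h'
  induction t' generalizing t0 with
  | nil => simp
  | cons a t'' ih =>
    have ha : 0 ≤ a := h' a (by simp)
    simp only [List.map_cons, List.zip_cons_cons, List.map_cons]
    rw [show t0 + 1 + 1 = (t0 + 1) + 1 by ring,
        slice_cons_shift x r (t0 + 1) a (by omega) ha,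
        ih a ha (fun b hb => h' b (by simp [hb]))]

theorem B_core (xs : List String) :
    sliceMap xs ((-1 : Int) :: (sepIdx xs ++ [(xs.length : Int)])) = splitRec xs := by
  induction xs with
  | nil =>
    show sliceMap [] [-1, 0] = splitRec []
    unfold sliceMap
    simp only [List.tail_cons, List.zip_cons_cons, List.zip_nil_right, List.map_cons,
      List.map_nil]
    rw [show (-1 : Int) + 1 = 0 by ring, slice_zero_zero]
    rfl
  | cons x r ih =>
    have hnn : ∀ a ∈ sepIdx r ++ [(r.length : Int)], 0 ≤ a := by
      intro a ha
      rcases List.mem_append.1 ha with h | h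
      · exact sepIdx_nonneg r a h
      · simp at h; omega
    cases ht : sepIdx r ++ [(r.length : Int)] with
    | nil => simp at ht
    | cons t0 t' =>
      have h0 : 0 ≤ t0 := hnn t0 (by rw [ht]; simp)
      have h' : ∀ a ∈ t', 0 ≤ a := fun a ha => hnn a (by rw [ht]; simp [ha])
      have hlen : ((x :: r).length : Int) = (r.length : Int) + 1 := by
        simp
      have hmap : sepIdx (x :: r) ++ [((x :: r).length : Int)]
          = (if x = "" then [(0 : Int)] else [])
            ++ ((t0 + 1) :: t'.map (· + 1)) := by
        rw [sepIdx_cons, hlen]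
        have : (sepIdx r).map (· + 1) ++ [(r.length : Int) + 1]
            = (sepIdx r ++ [(r.length : Int)]).map (· + 1) := by simp
        rw [List.append_assoc, this, ht]
        simp
      by_cases hx : x = ""
      · subst hx
        simp only [hmap]
        show sliceMap ("" :: r) (-1 :: 0 :: (t0 + 1) :: t'.map (· + 1)) = _
        unfold sliceMap at ih ⊢
        rw [ht] at ih
        simp only [List.tail_cons, List.zip_cons_cons, List.map_cons] at ih ⊢
        rw [show (-1 : Int) + 1 = 0 from by ring, slice_zero_zero,
            show (0 : Int) + 1 = 0 + 1 from rfl, slice_cons_shift "" r 0 t0 le_rfl h0,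
            shift_tail "" r t0 t' h0 h']
        rw [show (-1 : Int) + 1 = 0 from by ring] at ih
        simp only [PySem.List.slice_zero_start] at ih
        simp [splitRec, ih]
      · simp only [hmap, if_neg hx, List.nil_append]
        show sliceMap (x :: r) (-1 :: (t0 + 1) :: t'.map (· + 1)) = _
        unfold sliceMap at ih ⊢
        rw [ht] at ih
        simp only [List.tail_cons, List.zip_cons_cons, List.map_cons] at ih ⊢
        rw [show (-1 : Int) + 1 = 0 from by ring, slice_cons_zero x r t0 h0,
            shift_tail x r t0 t' h0 h']
        rw [show (-1 : Int) + 1 = 0 from by ring] at ih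
        simp only [splitRec, if_neg hx]
        cases h : splitRec r with
        | nil => exact absurd h (splitRec_ne_nil r)
        | cons g gs =>
          rw [← ih] at h
          injection h with h1 h2
          rw [← h1, ← h2]

theorem portB_eq_splitRec (xs : List String) :
    separate_by_empty_lines_alt xs = splitRec xs := by
  rw [← B_core xs]
  rfl

-- ===== VERDICT (by name: the statement is the Claim_ definition above) =====
theorem separate_by_empty_lines_spec : Claim_equal_separate_by_empty_lines := by
  intro xs _
  unfold Spec_separate_by_empty_lines
  rw [portA_eq_splitRec, portB_eq_splitRec]
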